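-- pv_equiv track=rewrite | github.com/alexxyu/advent-of-code | 2022/day-23/answer.py | construct_grid_from_elves
-- ===== SOURCE A (Python) =====
-- def construct_grid_from_elves(elves):
--     min_r = min(elves, key=lambda x: x[0])[0]
--     max_r = max(elves, key=lambda x: x[0])[0]
--     min_c = min(elves, key=lambda x: x[1])[1]
--     max_c = max(elves, key=lambda x: x[1])[1]
--
--     grid = [['.' for _ in range(max_c - min_c + 1)]
--             for _ in range(max_r - min_r + 1)]
--     for (r, c) in elves:
--         grid[r - min_r][c - min_c] = '#'
--     return grid
-- ===== SOURCE B (Python) =====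
-- def construct_grid_from_elves(elves):
--     min_r = min(elves, key=lambda x: x[0])[0]
--     max_r = max(elves, key=lambda x: x[0])[0]
--     min_c = min(elves, key=lambda x: x[1])[1]
--     max_c = max(elves, key=lambda x: x[1])[1]
--     positions = set(elves)
--     return [['#' if (r, c) in positions else '.' for c in range(min_c, max_c + 1)]
--             for r in range(min_r, max_r + 1)]
-- ===== Notes on version B (the rewrite author's own statement) =====
-- stated objective: alternative
-- what changed: B gathers: it builds a set of elf positions once and constructs each cell by membership test in a nested comprehension, instead of A's scatter of '#' marks onto a pre-filled '.' grid by indexed assignment.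
import Mathlib
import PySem

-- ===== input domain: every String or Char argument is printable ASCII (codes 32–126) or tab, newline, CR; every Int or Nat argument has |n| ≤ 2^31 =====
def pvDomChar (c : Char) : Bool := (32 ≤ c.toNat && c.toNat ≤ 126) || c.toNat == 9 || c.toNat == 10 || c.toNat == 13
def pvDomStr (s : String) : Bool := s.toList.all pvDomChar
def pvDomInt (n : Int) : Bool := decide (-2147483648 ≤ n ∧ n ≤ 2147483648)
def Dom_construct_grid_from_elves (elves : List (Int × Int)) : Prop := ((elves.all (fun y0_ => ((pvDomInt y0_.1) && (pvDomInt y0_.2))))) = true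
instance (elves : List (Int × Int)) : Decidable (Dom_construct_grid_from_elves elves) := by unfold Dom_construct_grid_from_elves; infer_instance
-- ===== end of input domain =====

-- B builds a set of the elf positions once and GATHERS each cell by membership test in a
-- nested comprehension over the row/column ranges, instead of A's SCATTER of '#' marks onto a
-- pre-filled '.' grid by indexed assignment (objective: alternative, same cost).

-- ===== PORT A =====
def construct_grid_from_elves (elves : List (Int × Int)) : List (List String) :=
  match PySem.List.min? elves (fun x => x.1), PySem.List.max? elves (fun x => x.1),
        PySem.List.min? elves (fun x => x.2), PySem.List.max? elves (fun x => x.2) with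
  | some pmin_r, some pmax_r, some pmin_c, some pmax_c =>
    let min_r := pmin_r.1
    let max_r := pmax_r.1
    let min_c := pmin_c.2
    let max_c := pmax_c.2
    let grid := (PySem.List.pyRange 0 (max_r - min_r + 1) 1).map
      (fun _ => (PySem.List.pyRange 0 (max_c - min_c + 1) 1).map (fun _ => "."))
    elves.foldl (fun g p =>
      PySem.List.pySetD g (p.1 - min_r)
        (PySem.List.pySetD (PySem.List.pyGetD g (p.1 - min_r) []) (p.2 - min_c) "#")) grid
  | _, _, _, _ => []   -- unreachable: min/max raise ValueError on [], excluded by Pre_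

-- ===== PORT B =====
def construct_grid_from_elves_alt (elves : List (Int × Int)) : List (List String) :=
  match PySem.List.min? elves (fun x => x.1) with
  | none => []   -- unreachable: min/max raise ValueError on [], excluded by Pre_
  | some pmin_r =>
    match PySem.List.max? elves (fun x => x.1) with
    | none => []
    | some pmax_r =>
      match PySem.List.min? elves (fun x => x.2) with
      | none => []
      | some pmin_c =>
        match PySem.List.max? elves (fun x => x.2) with
        | none => []
        | some pmax_c =>
          let min_r := pmin_r.1
          let max_r := pmax_r.1
          let min_c := pmin_c.2
          let max_c := pmax_c.2
          let positions : PySem.Set (Int × Int) := PySem.Set.ofList elves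
          (PySem.List.pyRange min_r (max_r + 1) 1).map (fun r =>
            (PySem.List.pyRange min_c (max_c + 1) 1).map (fun c =>
              if PySem.Set.contains positions (r, c) then "#" else "."))

-- ===== PRECONDITION & SPEC =====
-- Pre_ excludes only the empty list, on which A's min() (and B's too) raises ValueError.
def Pre_construct_grid_from_elves (elves : List (Int × Int)) : Prop := elves ≠ []
instance (elves : List (Int × Int)) : Decidable (Pre_construct_grid_from_elves elves) := by unfold Pre_construct_grid_from_elves; infer_instance
def pvWitness_construct_grid_from_elves : (List (Int × Int)) := [((0 : Int), (1 : Int)), ((2 : Int), (0 : Int))]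

def Spec_construct_grid_from_elves (elves : List (Int × Int)) (out : List (List String)) : Prop := out = construct_grid_from_elves_alt elves
instance (elves : List (Int × Int)) (out : List (List String)) : Decidable (Spec_construct_grid_from_elves elves out) := by unfold Spec_construct_grid_from_elves; infer_instance

-- ===== CLAIM (what is proved, stated in full; the proofs are below) =====
def Claim_equal_construct_grid_from_elves : Prop := ∀ (elves : List (Int × Int)), Dom_construct_grid_from_elves elves → Pre_construct_grid_from_elves elves → Spec_construct_grid_from_elves elves (construct_grid_from_elves elves)

-- ===== LEMMAS AND PROOFS =====

-- grid[i][j] = '#' on a grid of lists, with Nat indices (what A's assignment does in range)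
def pvMark (g : List (List String)) (i j : Nat) : List (List String) :=
  g.set i ((g.getD i []).set j "#")

-- pySetD with a nonnegative index is List.set at the Nat index (both are no-ops out of range)
theorem pvSetD_nonneg {α : Type} (xs : List α) (i : Int) (v : α) (h : 0 ≤ i) :
    PySem.List.pySetD xs i v = xs.set i.toNat v := by
  simp [PySem.List.pySetD, PySem.List.pySet?, PySem.List.pyIdx?, h]
  split_ifs with h1
  · simp
  · rw [List.set_eq_of_length_le (by omega)]; rfl

theorem pvSet_map_range {α : Type} (h : Nat → α) (n b : Nat) (v : α) :
    ((List.range n).map h).set b v = (List.range n).map (fun j => if j = b then v else h j) := by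
  apply List.ext_getElem
  · simp
  · intro i h1 h2
    simp only [List.getElem_set, List.getElem_map, List.getElem_range]
    by_cases hbi : b = i
    · subst hbi; simp
    · rw [if_neg hbi, if_neg (fun h => hbi h.symm)]

theorem pvMark_map_range (f : Nat → Nat → String) (Rn Cn a b : Nat) (ha : a < Rn) (_hb : b < Cn) :
    pvMark ((List.range Rn).map (fun i => (List.range Cn).map (f i))) a b
    = (List.range Rn).map (fun i => (List.range Cn).map (fun j => if i = a ∧ j = b then "#" else f i j)) := by
  unfold pvMark
  rw [PySem.List.getD_map_range _ _ _ _ ha, pvSet_map_range _ _ _ _, pvSet_map_range _ _ _ _]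
  apply List.map_congr_left
  intro i hi
  split_ifs with h
  · subst h
    apply List.map_congr_left
    intro j hj
    by_cases hjb : j = b <;> simp [hjb]
  · apply List.map_congr_left
    intro j hj
    simp [h]

theorem pvFoldl_mark (es : List (Int × Int)) (idx : Int × Int → Nat × Nat) (Rn Cn : Nat)
    (hb : ∀ p ∈ es, (idx p).1 < Rn ∧ (idx p).2 < Cn) (f : Nat → Nat → String) :
    es.foldl (fun g p => pvMark g (idx p).1 (idx p).2)
        ((List.range Rn).map (fun i => (List.range Cn).map (f i)))
    = (List.range Rn).map (fun i => (List.range Cn).map (fun j =>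
        if ∃ p ∈ es, idx p = (i, j) then "#" else f i j)) := by
  induction es generalizing f with
  | nil => simp
  | cons p es ih =>
    simp only [List.foldl_cons]
    rw [pvMark_map_range f Rn Cn (idx p).1 (idx p).2 (hb p (by simp)).1 (hb p (by simp)).2]
    rw [ih (fun q hq => hb q (by simp [hq])) (fun i j => if i = (idx p).1 ∧ j = (idx p).2 then "#" else f i j)]
    apply List.map_congr_left
    intro i hi
    apply List.map_congr_left
    intro j hj
    by_cases hex : ∃ q ∈ es, idx q = (i, j)
    · have : ∃ q ∈ p :: es, idx q = (i, j) := by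
        obtain ⟨q, hq, hq2⟩ := hex; exact ⟨q, by simp [hq], hq2⟩
      simp [hex]
    · by_cases hp : idx p = (i, j)
      · have h1 : i = (idx p).1 ∧ j = (idx p).2 := by rw [hp]; exact ⟨rfl, rfl⟩
        simp [h1]
      · have h1 : ¬(i = (idx p).1 ∧ j = (idx p).2) := by
          rintro ⟨rfl, rfl⟩; exact hp rfl
        have h2 : ¬∃ q ∈ p :: es, idx q = (i, j) := by
          rintro ⟨q, hq, hq2⟩
          rcases List.mem_cons.mp hq with rfl | hq
          · exact hp hq2
          · exact hex ⟨q, hq, hq2⟩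
        simp [hex, h1, hp]

theorem construct_grid_eq (elves : List (Int × Int)) (h : elves ≠ []) :
    construct_grid_from_elves elves = construct_grid_from_elves_alt elves := by
  rcases h1 : PySem.List.min? elves (fun x => x.1) with _ | pmin_r
  · exact absurd ((PySem.List.min?_eq_none_iff _ _).mp h1) h
  rcases h2 : PySem.List.max? elves (fun x => x.1) with _ | pmax_r
  · exact absurd ((PySem.List.max?_eq_none_iff _ _).mp h2) h
  rcases h3 : PySem.List.min? elves (fun x => x.2) with _ | pmin_c
  · exact absurd ((PySem.List.min?_eq_none_iff _ _).mp h3) h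
  rcases h4 : PySem.List.max? elves (fun x => x.2) with _ | pmax_c
  · exact absurd ((PySem.List.max?_eq_none_iff _ _).mp h4) h
  have hmr := PySem.List.min?_isMin h1
  have hMr := PySem.List.max?_isMax h2
  have hmc := PySem.List.min?_isMin h3
  have hMc := PySem.List.max?_isMax h4
  set mr := pmin_r.1 with hmrdef
  set Mr := pmax_r.1 with hMrdef
  set mc := pmin_c.2 with hmcdef
  set Mc := pmax_c.2 with hMcdef
  set Rn := (Mr - mr + 1).toNat with hRn
  set Cn := (Mc - mc + 1).toNat with hCn
  simp only [construct_grid_from_elves, construct_grid_from_elves_alt, h1, h2, h3, h4]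
  -- A side: reduce the initial grid to a map over List.range, and the loop body to pvMark
  rw [PySem.List.pyRange_one 0 (Mr - mr + 1), PySem.List.pyRange_one 0 (Mc - mc + 1)]
  rw [PySem.List.pyRange_one mr (Mr + 1), PySem.List.pyRange_one mc (Mc + 1)]
  simp only [List.map_map, Function.comp_def]
  have hsub : (Mr - mr + 1 - 0).toNat = Rn := by omega
  have hsub2 : (Mc - mc + 1 - 0).toNat = Cn := by omega
  have hsub3 : (Mr + 1 - mr).toNat = Rn := by omega
  have hsub4 : (Mc + 1 - mc).toNat = Cn := by omega
  rw [hsub, hsub2, hsub3, hsub4]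
  have hstep : ∀ (g : List (List String)), ∀ p ∈ elves,
      PySem.List.pySetD g (p.1 - mr)
        (PySem.List.pySetD (PySem.List.pyGetD g (p.1 - mr) []) (p.2 - mc) "#")
      = pvMark g (p.1 - mr).toNat (p.2 - mc).toNat := by
    intro g p hp
    have hr := hmr p hp
    have hc := hmc p hp
    rw [pvSetD_nonneg _ _ _ (by omega), pvSetD_nonneg _ _ _ (by omega),
        PySem.List.pyGetD_of_nonneg _ _ (by omega)]
    rfl
  rw [PySem.List.foldl_congr_mem _ _
    (fun g p => pvMark g ((p.1 - mr).toNat) ((p.2 - mc).toNat)) _ hstep]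
  have hbounds : ∀ p ∈ elves,
      ((fun p => ((p.1 - mr).toNat, (p.2 - mc).toNat)) p).1 < Rn ∧
      ((fun p => ((p.1 - mr).toNat, (p.2 - mc).toNat)) p).2 < Cn := by
    intro p hp
    have := hmr p hp; have := hMr p hp; have := hmc p hp; have := hMc p hp
    dsimp only
    omega
  have hfold := pvFoldl_mark elves (fun p => ((p.1 - mr).toNat, (p.2 - mc).toNat)) Rn Cn
    hbounds (fun _ _ => ".")
  dsimp only at hfold
  rw [hfold]
  apply List.map_congr_left
  intro i hi
  apply List.map_congr_left
  intro j hj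
  simp only [List.mem_range] at hi hj
  apply if_congr _ rfl rfl
  constructor
  · rintro ⟨p, hp, hpe⟩
    have h5 := hmr p hp
    have h6 := hmc p hp
    have hpi : p.1 = mr + (i : Int) := by
      have := congrArg Prod.fst hpe; simp only at this; omega
    have hpj : p.2 = mc + (j : Int) := by
      have := congrArg Prod.snd hpe; simp only at this; omega
    have hmem : (mr + (i : Int), mc + (j : Int)) ∈ elves := by
      have hpeq : p = (mr + (i : Int), mc + (j : Int)) := by
        ext
        · exact hpi
        · exact hpj
      rw [← hpeq]; exact hp
    simp [PySem.Set.contains, PySem.Set.mem_ofList, hmem]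
  · intro hcont
    have hmem : (mr + (i : Int), mc + (j : Int)) ∈ elves := by
      simpa [PySem.Set.contains, PySem.Set.mem_ofList] using hcont
    refine ⟨(mr + (i : Int), mc + (j : Int)), hmem, ?_⟩
    simp only [Prod.mk.injEq]
    constructor <;> omega

-- ===== VERDICT (by name: the statement is the Claim_ definition above) =====
theorem construct_grid_from_elves_spec : Claim_equal_construct_grid_from_elves := by
  intro elves _ hpre
  unfold Spec_construct_grid_from_elves
  unfold Pre_construct_grid_from_elves at hpre
  exact construct_grid_eq elves hpre
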